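-- pv_equiv track=rewrite | github.com/imirransom7/Python_Basics | string_exercises/exercise4.py | lower_and_upper
-- ===== SOURCE A (Python) =====
-- def lower_and_upper(string: str) -> str:
--     # creating an empty string variable for the lowercase letters
--     s1 = ""
--     # now doing the same for the uppercase letters
--     s2 = ""
--     # iterating through the string
--     for s in string:
--         # checking if element is lowercase
--         if s.islower():
--             s1 += s
--         # if it is not lowercase, then it must be uppercase
--         else:
--             s2 += s
--     return s1 + s2
-- ===== SOURCE B (Python) =====
-- def lower_and_upper(string: str) -> str:
--     # Stable sort by a two-valued key: lowercase chars (key 0) come first,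
--     # everything else (key 1) after, each group keeping its original order.
--     return ''.join(sorted(string, key=lambda c: 0 if c.islower() else 1))
-- ===== Notes on version B (the rewrite author's own statement) =====
-- stated objective: alternative
-- what changed: Replaces the two-accumulator character loop with a single stable sort on a two-valued key (0 for lowercase, 1 otherwise), relying on sort stability to preserve each group's order.
import Mathlib
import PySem

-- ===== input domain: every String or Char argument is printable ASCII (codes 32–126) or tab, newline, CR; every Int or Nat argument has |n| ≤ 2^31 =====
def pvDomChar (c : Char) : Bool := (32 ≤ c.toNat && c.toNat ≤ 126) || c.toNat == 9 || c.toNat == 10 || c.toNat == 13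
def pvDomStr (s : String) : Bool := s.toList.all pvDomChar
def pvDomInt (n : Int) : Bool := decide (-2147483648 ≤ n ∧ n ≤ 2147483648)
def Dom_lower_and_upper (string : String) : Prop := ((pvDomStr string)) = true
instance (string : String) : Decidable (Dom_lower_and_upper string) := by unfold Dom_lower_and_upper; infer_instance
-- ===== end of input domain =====

-- B replaces the two-accumulator loop with one stable sort on a two-valued key (alternative decomposition, not faster).

-- ===== PORT A =====
-- the two string accumulators s1, s2 are carried as List Char (strings are ported on the List Char side)
def lower_and_upper (string : String) : String :=
  let r := string.toList.foldl
    (fun (p : List Char × List Char) s =>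
      if PySem.Chars.islower s then (p.1 ++ [s], p.2) else (p.1, p.2 ++ [s]))
    ([], [])
  String.ofList (r.1 ++ r.2)

-- ===== PORT B =====
-- ''.join(sorted(string, key=lambda c: 0 if c.islower() else 1))
def lower_and_upper_alt (string : String) : String :=
  String.ofList (PySem.List.sorted string.toList
    (fun c => if PySem.Chars.islower c then (0 : Int) else 1) false)

-- ===== PRECONDITION & SPEC =====
def Spec_lower_and_upper (string : String) (out : String) : Prop := out = lower_and_upper_alt string
instance (string : String) (out : String) : Decidable (Spec_lower_and_upper string out) := by unfold Spec_lower_and_upper; infer_instance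

-- ===== CLAIM (what is proved, stated in full; the proofs are below) =====
def Claim_equal_lower_and_upper : Prop := ∀ (string : String), Dom_lower_and_upper string → Spec_lower_and_upper string (lower_and_upper string)

-- ===== LEMMAS AND PROOFS =====

-- the comparison PySem.List.sorted uses for B's key
def pvBefore (a b : Char) : Bool :=
  decide ((if PySem.Chars.islower a then (0 : Int) else 1) < (if PySem.Chars.islower b then (0 : Int) else 1))

lemma insertBy_of_not_lower (x : Char) (hx : PySem.Chars.islower x = false) (zs : List Char) :
    PySem.List.insertBy pvBefore x zs = zs ++ [x] := by
  induction zs with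
  | nil => simp [PySem.List.insertBy]
  | cons y ys ih =>
      have hb : pvBefore x y = false := by
        by_cases hy : PySem.Chars.islower y = true <;> simp [pvBefore, hx, hy]
      simp [PySem.List.insertBy, hb, ih]

lemma insertBy_of_lower (x : Char) (hx : PySem.Chars.islower x = true)
    (L U : List Char) (hL : ∀ c ∈ L, PySem.Chars.islower c = true)
    (hU : ∀ c ∈ U, PySem.Chars.islower c = false) :
    PySem.List.insertBy pvBefore x (L ++ U) = L ++ x :: U := by
  induction L with
  | nil =>
      cases U with
      | nil => simp [PySem.List.insertBy]
      | cons u us =>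
          have hu : PySem.Chars.islower u = false := hU u (by simp)
          simp [PySem.List.insertBy, pvBefore, hx, hu]
  | cons l ls ih =>
      have hl : PySem.Chars.islower l = true := hL l (by simp)
      have hb : pvBefore x l = false := by simp [pvBefore, hx, hl]
      simp only [List.cons_append, PySem.List.insertBy, hb, if_neg Bool.false_ne_true]
      rw [ih (fun c hc => hL c (by simp [hc]))]

lemma fold_insertBy (xs L U : List Char)
    (hL : ∀ c ∈ L, PySem.Chars.islower c = true)
    (hU : ∀ c ∈ U, PySem.Chars.islower c = false) :
    xs.foldl (fun acc x => PySem.List.insertBy pvBefore x acc) (L ++ U) =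
      (L ++ xs.filter (fun c => PySem.Chars.islower c)) ++
      (U ++ xs.filter (fun c => !PySem.Chars.islower c)) := by
  induction xs generalizing L U with
  | nil => simp
  | cons x xs ih =>
      by_cases hx : PySem.Chars.islower x = true
      · have h1 : PySem.List.insertBy pvBefore x (L ++ U) = (L ++ [x]) ++ U := by
          simpa using insertBy_of_lower x hx L U hL hU
        have hL' : ∀ c ∈ L ++ [x], PySem.Chars.islower c = true := by
          intro c hc
          rcases List.mem_append.1 hc with h | h
          · exact hL c h
          · simp at h; subst h; exact hx
        simp only [List.foldl_cons, h1, ih (L ++ [x]) U hL' hU]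
        simp [hx]
      · have hx' : PySem.Chars.islower x = false := by simpa using hx
        have h1 : PySem.List.insertBy pvBefore x (L ++ U) = L ++ (U ++ [x]) := by
          simpa using insertBy_of_not_lower x hx' (L ++ U)
        have hU' : ∀ c ∈ U ++ [x], PySem.Chars.islower c = false := by
          intro c hc
          rcases List.mem_append.1 hc with h | h
          · exact hU c h
          · simp at h; subst h; exact hx'
        simp only [List.foldl_cons, h1, ih L (U ++ [x]) hL hU']
        simp [hx']

lemma sorted_eq_partition (xs : List Char) :
    PySem.List.sorted xs (fun c => if PySem.Chars.islower c then (0 : Int) else 1) false =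
      xs.filter (fun c => PySem.Chars.islower c) ++ xs.filter (fun c => !PySem.Chars.islower c) := by
  have := fold_insertBy xs [] [] (by simp) (by simp)
  simpa [PySem.List.sorted, pvBefore] using this

lemma fold_partition (xs s1 s2 : List Char) :
    xs.foldl
      (fun (p : List Char × List Char) s =>
        if PySem.Chars.islower s then (p.1 ++ [s], p.2) else (p.1, p.2 ++ [s]))
      (s1, s2) =
    (s1 ++ xs.filter (fun c => PySem.Chars.islower c),
     s2 ++ xs.filter (fun c => !PySem.Chars.islower c)) := by
  induction xs generalizing s1 s2 with
  | nil => simp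
  | cons x xs ih =>
      by_cases hx : PySem.Chars.islower x = true
      · simp [hx, ih]
      · have hx' : PySem.Chars.islower x = false := by simpa using hx
        simp [hx', ih]

-- ===== VERDICT (by name: the statement is the Claim_ definition above) =====
theorem lower_and_upper_spec : Claim_equal_lower_and_upper := by
  intro s _
  unfold Spec_lower_and_upper lower_and_upper lower_and_upper_alt
  rw [sorted_eq_partition, fold_partition]
  simp
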